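-- pv_equiv track=rewrite | github.com/VershaKashyap07/MY_DSA_Prep | Sliding Window/First negative in every window of size k.py | First_Neg
-- ===== SOURCE A (Python) =====
-- def First_Neg(arr,k):
--     res = []
--     for i in range(len(arr)):
--         for j in range(i,len(arr)):
--             if j-i+1 == k:
--                 flag = 0
--                 for l in range(i,j+1):
--                     if arr[l]<0:
--                         flag = 1
--                         res.append(arr[l])
--                         break
--                 if flag ==0:
--                     res.append(0)
--                 break
--
--     return res
-- ===== SOURCE B (Python) =====
-- def First_Neg(arr, k):
--     # O(n): backwards pass computing, for each i, the index of the next negative at or after i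
--     n = len(arr)
--     if k < 1 or k > n:
--         return []
--     nxt = [None] * n
--     j = None
--     for i in range(n - 1, -1, -1):
--         if arr[i] < 0:
--             j = i
--         nxt[i] = j
--     return [arr[nxt[i]] if nxt[i] is not None and nxt[i] <= i + k - 1 else 0
--             for i in range(n - k + 1)]
-- ===== Notes on version B (the rewrite author's own statement) =====
-- stated objective: faster
-- what changed: Replaced A's three nested loops (for each start, scan to find the window end, then scan the window for its first negative) with a single O(n) backwards pass that records for every index the position of the next negative element, then one map over the window starts.
import Mathlib
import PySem

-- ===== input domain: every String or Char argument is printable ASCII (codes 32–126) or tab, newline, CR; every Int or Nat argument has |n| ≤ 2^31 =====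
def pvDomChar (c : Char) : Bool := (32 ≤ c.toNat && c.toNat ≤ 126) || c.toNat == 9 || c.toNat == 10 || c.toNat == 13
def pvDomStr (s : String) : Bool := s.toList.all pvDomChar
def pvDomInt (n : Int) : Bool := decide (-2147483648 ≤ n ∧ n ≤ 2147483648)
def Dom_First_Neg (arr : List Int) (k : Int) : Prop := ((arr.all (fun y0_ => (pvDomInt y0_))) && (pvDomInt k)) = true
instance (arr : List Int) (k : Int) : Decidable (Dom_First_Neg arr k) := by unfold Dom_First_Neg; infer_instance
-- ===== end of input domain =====

-- B re-implements A (O(n·k) nested window scans) as an O(n) backwards next-negative pass; return values proved equal on all inputs.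

-- ===== PORT A =====
-- inner loop `for l in range(i, j+1): if arr[l]<0: append & break` + trailing `if flag==0: append 0`
def pvScanA (arr : List Int) : List Nat → List Int → List Int
  | [], res => res ++ [0]
  | l :: ls, res =>
    if arr.getD l 0 < 0 then res ++ [arr.getD l 0]   -- arr[l], always in range here
    else pvScanA arr ls res

-- middle loop `for j in range(i, len(arr)):` with its `break` after the first j with j-i+1 == k
def pvInnerA (arr : List Int) (k : Int) (i : Nat) : List Nat → List Int → List Int
  | [], res => res
  | j :: js, res =>
    if (j : Int) - (i : Int) + 1 = k then pvScanA arr (List.range' i (j + 1 - i)) res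
    else pvInnerA arr k i js res

def First_Neg (arr : List Int) (k : Int) : List Int :=
  (List.range arr.length).foldl
    (fun res i => pvInnerA arr k i (List.range' i (arr.length - i)) res) []

-- ===== PORT B =====
-- backwards pass: element at position i is the index (offset d) of the first negative at or after i
def pvNxt : List Int → Nat → List (Option Nat)
  | [], _ => []
  | a :: rest, d =>
    let r := pvNxt rest (d + 1)
    (if a < 0 then some d else r.headD none) :: r

def First_Neg_alt (arr : List Int) (k : Int) : List Int :=
  if k < 1 ∨ (arr.length : Int) < k then []
  else
    (List.range (arr.length - k.toNat + 1)).map (fun i =>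
      match (pvNxt arr 0).getD i none with
      | some j => if (j : Int) ≤ (i : Int) + k - 1 then arr.getD j 0 else 0
      | none => 0)

-- ===== PRECONDITION & SPEC =====
def Spec_First_Neg (arr : List Int) (k : Int) (out : List Int) : Prop := out = First_Neg_alt arr k
instance (arr : List Int) (k : Int) (out : List Int) : Decidable (Spec_First_Neg arr k out) := by unfold Spec_First_Neg; infer_instance

-- ===== CLAIM (what is proved, stated in full; the proofs are below) =====
def Claim_equal_First_Neg : Prop := ∀ (arr : List Int) (k : Int), Dom_First_Neg arr k → Spec_First_Neg arr k (First_Neg arr k)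

-- ===== LEMMAS AND PROOFS =====

-- value appended by A's window scan, as a function
def pvFNV (arr : List Int) : List Nat → Int
  | [] => 0
  | l :: ls => if arr.getD l 0 < 0 then arr.getD l 0 else pvFNV arr ls

-- index of the first negative element of a list
def pvFNI : List Int → Option Nat
  | [] => none
  | a :: rest => if a < 0 then some 0 else (pvFNI rest).map (· + 1)

lemma pvScanA_eq (arr : List Int) (ls : List Nat) (res : List Int) :
    pvScanA arr ls res = res ++ [pvFNV arr ls] := by
  induction ls with
  | nil => rfl
  | cons l ls ih => simp only [pvScanA, pvFNV]; split <;> simp [ih]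

lemma pvInnerA_none (arr : List Int) (k : Int) (i : Nat) (js : List Nat) (res : List Int)
    (h : ∀ j ∈ js, (j : Int) - (i : Int) + 1 ≠ k) :
    pvInnerA arr k i js res = res := by
  induction js with
  | nil => rfl
  | cons j js ih =>
    simp only [pvInnerA]
    rw [if_neg (h j (by simp))]
    exact ih (fun j hj => h j (by simp [hj]))

lemma pvInnerA_hit (arr : List Int) (k : Int) (i : Nat) (res : List Int) (hk : 1 ≤ k) :
    ∀ (m j : Nat), i ≤ j → (j : Int) ≤ (i : Int) + k - 1 → (i : Int) + k ≤ (j : Int) + m →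
    pvInnerA arr k i (List.range' j m) res = pvScanA arr (List.range' i k.toNat) res := by
  intro m
  induction m with
  | zero => intro j _ h2 h3; exfalso; omega
  | succ m ih =>
    intro j h1 h2 h3
    rw [List.range'_succ]
    simp only [pvInnerA]
    by_cases hj : (j : Int) - (i : Int) + 1 = k
    · rw [if_pos hj]
      have : j + 1 - i = k.toNat := by omega
      rw [this]
    · rw [if_neg hj]
      exact ih (j + 1) (by omega) (by push_cast; omega) (by push_cast; push_cast at h3; omega)

lemma pvNxt_getD (arr : List Int) :
    ∀ (i d : Nat), (pvNxt arr d).getD i none = (pvFNI (arr.drop i)).map (· + (i + d)) := by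
  induction arr with
  | nil => intro i d; simp [pvNxt, pvFNI]
  | cons a rest ih =>
    intro i d
    cases i with
    | zero =>
      simp only [pvNxt, List.drop_zero, pvFNI, List.getD_cons_zero]
      by_cases ha : a < 0
      · simp [ha]
      · rw [if_neg ha, if_neg ha]
        cases rest with
        | nil => simp [pvNxt, pvFNI]
        | cons b rs =>
          have h0 := ih 0 (d + 1)
          have hd : (pvNxt (b :: rs) (d + 1)).headD none
              = (pvNxt (b :: rs) (d + 1)).getD 0 none := by
            simp [pvNxt]
          rw [hd, h0]
          simp only [List.drop_zero]
          cases pvFNI (b :: rs) with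
          | none => simp
          | some t => simp; omega
    | succ i =>
      simp only [pvNxt, List.getD_cons_succ, List.drop_succ_cons]
      rw [ih i (d + 1)]
      cases pvFNI (rest.drop i) with
      | none => simp
      | some t => simp; omega

lemma pvFNV_range' (arr : List Int) :
    ∀ (m i : Nat), pvFNV arr (List.range' i m)
      = match pvFNI (arr.drop i) with
        | some t => if t < m then arr.getD (i + t) 0 else 0
        | none => 0 := by
  intro m
  induction m with
  | zero =>
    intro i; cases pvFNI (arr.drop i) <;> simp [pvFNV]
  | succ m ih =>
    intro i
    rw [List.range'_succ]
    simp only [pvFNV]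
    by_cases hi : i < arr.length
    · have hdrop : arr.drop i = arr[i] :: arr.drop (i + 1) :=
        List.drop_eq_getElem_cons hi
      have hget : arr.getD i 0 = arr[i] := List.getD_eq_getElem arr 0 hi
      by_cases ha : arr[i] < 0
      · rw [if_pos (by rw [hget]; exact ha)]
        rw [hdrop]
        simp only [pvFNI, if_pos ha]
        simp
      · rw [if_neg (by rw [hget]; exact ha), ih (i + 1)]
        rw [hdrop]
        simp only [pvFNI, if_neg ha]
        cases h : pvFNI (arr.drop (i + 1)) with
        | none => simp [h]
        | some t =>
          simp only [h, Option.map_some]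
          have : i + (t + 1) = i + 1 + t := by omega
          simp [this, Nat.succ_lt_succ_iff]
    · have h1 : arr.drop i = [] := List.drop_eq_nil_of_le (by omega)
      have h2 : arr.drop (i + 1) = [] := List.drop_eq_nil_of_le (by omega)
      have hget : arr.getD i 0 = 0 := by
        rw [List.getD_eq_getD_getElem?, List.getElem?_eq_none (by omega)]; rfl
      rw [if_neg (by rw [hget]; exact lt_irrefl 0), ih (i + 1), h1, h2]
      rfl

lemma pvFlatMap_eq_map {a b : Type} (ls : List a) (F : a → List b) (g : a → b)
    (h : ∀ i ∈ ls, F i = [g i]) : ls.flatMap F = ls.map g := by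
  induction ls with
  | nil => rfl
  | cons x xs ih =>
    simp only [List.flatMap_cons, List.map_cons]
    rw [h x (by simp), ih (fun i hi => h i (by simp [hi]))]
    rfl

-- A's fold step, rewritten: appends the window value iff the window fits
lemma stepA (arr : List Int) (k : Int) (i : Nat) (res : List Int) (hi : i < arr.length) :
    pvInnerA arr k i (List.range' i (arr.length - i)) res
      = if 1 ≤ k ∧ i + k.toNat ≤ arr.length then res ++ [pvFNV arr (List.range' i k.toNat)]
        else res := by
  split
  · rename_i h
    rw [pvInnerA_hit arr k i res h.1 (arr.length - i) i le_rfl (by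
        have := h.2; have := h.1; omega) (by
        have := h.2; have := h.1; push_cast; omega)]
    exact pvScanA_eq arr _ res
  · rename_i h
    apply pvInnerA_none
    intro j hj
    rw [List.mem_range'_1] at hj
    intro hc
    apply h
    constructor <;> omega

lemma foldA (arr : List Int) (k : Int) :
    ∀ (ns : List Nat) (res : List Int), (∀ i ∈ ns, i < arr.length) →
    ns.foldl (fun res i => pvInnerA arr k i (List.range' i (arr.length - i)) res) res
      = res ++ ns.flatMap (fun i =>
          if 1 ≤ k ∧ i + k.toNat ≤ arr.length then [pvFNV arr (List.range' i k.toNat)] else []) := by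
  intro ns
  induction ns with
  | nil => intro res _; simp
  | cons n ns ih =>
    intro res h
    simp only [List.foldl_cons, List.flatMap_cons]
    rw [stepA arr k n res (h n (by simp)), ih _ (fun i hi => h i (by simp [hi]))]
    split <;> simp

-- ===== VERDICT (by name: the statement is the Claim_ definition above) =====
theorem First_Neg_spec : Claim_equal_First_Neg := by
  intro arr k _
  unfold Spec_First_Neg First_Neg First_Neg_alt
  rw [foldA arr k (List.range arr.length) [] (fun i hi => List.mem_range.mp hi)]
  simp only [List.nil_append]
  by_cases hk : k < 1 ∨ (arr.length : Int) < k
  · rw [if_pos hk]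
    rw [List.flatMap_eq_nil_iff.mpr]
    intro l hl
    rw [if_neg]
    rw [List.mem_range] at hl
    rcases hk with hk | hk
    · intro h; omega
    · intro h; omega
  · rw [if_neg hk]
    rw [not_or] at hk
    rw [not_lt] at hk
    rw [not_lt] at hk
    obtain ⟨hk1, hk2⟩ := hk
    have hkn : k.toNat ≤ arr.length := by omega
    have hsplit : List.range arr.length
        = List.range (arr.length - k.toNat + 1)
          ++ List.range' (arr.length - k.toNat + 1) (k.toNat - 1) := by
      have h := @List.range'_append_1 0 (arr.length - k.toNat + 1) (k.toNat - 1)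
      rw [Nat.zero_add] at h
      rw [List.range_eq_range', List.range_eq_range', h]
      congr 1
      omega
    rw [hsplit, List.flatMap_append]
    have h2 : (List.range' (arr.length - k.toNat + 1) (k.toNat - 1)).flatMap
        (fun i => if 1 ≤ k ∧ i + k.toNat ≤ arr.length
          then [pvFNV arr (List.range' i k.toNat)] else []) = [] := by
      rw [List.flatMap_eq_nil_iff]
      intro l hl
      rw [List.mem_range'_1] at hl
      rw [if_neg]
      intro h
      omega
    rw [h2, List.append_nil]
    apply pvFlatMap_eq_map
    intro i hi
    rw [List.mem_range] at hi
    rw [if_pos ⟨hk1, by omega⟩]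
    congr 1
    rw [pvFNV_range' arr k.toNat i, pvNxt_getD arr i 0, Nat.add_zero]
    cases h : pvFNI (arr.drop i) with
    | none => rfl
    | some t =>
      simp only [Option.map_some]
      by_cases ht : t < k.toNat
      · rw [if_pos ht]
        have : ((t + i : Nat) : Int) ≤ (i : Int) + k - 1 := by push_cast; omega
        rw [if_pos this]
        congr 1
        omega
      · rw [if_neg ht]
        have : ¬ ((t + i : Nat) : Int) ≤ (i : Int) + k - 1 := by push_cast; omega
        rw [if_neg this]
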